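-- pv_equiv track=rewrite | github.com/projeto-de-algoritmos/PD_Krypt | main.py | codificarTexto
-- ===== SOURCE A (Python) =====
-- def codificarTexto(publicKey, texto):
--     textoBinario = texto.encode("utf8")
--
--     textoCriptografado = []
--     for byte in textoBinario:
--         codigo = format(byte, '#010b')[2:]
--
--         posicao = 0
--         while posicao < 8:
--             if not posicao:
--                 textoCriptografado.append(0)
--             if codigo[posicao] == '1':
--                 posicaoSendoCifrada = len(textoCriptografado) - 1
--
--                 codigoCifrado = textoCriptografado[posicaoSendoCifrada]
--                 novoCodigoCifrado = codigoCifrado + publicKey[posicao]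
--
--                 textoCriptografado[posicaoSendoCifrada] = novoCodigoCifrado
--
--             posicao = posicao + 1
--
--     return textoCriptografado
-- ===== SOURCE B (Python) =====
-- def codificarTexto(publicKey, texto):
--     cache = {}
--     resultado = []
--     for byte in texto.encode("utf8"):
--         if byte not in cache:
--             valor = 0
--             for i in range(8):
--                 if (byte >> (7 - i)) & 1:
--                     valor += publicKey[i]
--             cache[byte] = valor
--         resultado.append(cache[byte])
--     return resultado
-- ===== Notes on version B (the rewrite author's own statement) =====
-- stated objective: faster
-- what changed: B replaces A's per-byte rebuild of the accumulator (binary-string formatting plus append/last-slot updates inside the result list) with a lazily memoized table: each distinct byte's code is computed once by a bit-sum and then looked up, and the result is a plain append-only list.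
import Mathlib
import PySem

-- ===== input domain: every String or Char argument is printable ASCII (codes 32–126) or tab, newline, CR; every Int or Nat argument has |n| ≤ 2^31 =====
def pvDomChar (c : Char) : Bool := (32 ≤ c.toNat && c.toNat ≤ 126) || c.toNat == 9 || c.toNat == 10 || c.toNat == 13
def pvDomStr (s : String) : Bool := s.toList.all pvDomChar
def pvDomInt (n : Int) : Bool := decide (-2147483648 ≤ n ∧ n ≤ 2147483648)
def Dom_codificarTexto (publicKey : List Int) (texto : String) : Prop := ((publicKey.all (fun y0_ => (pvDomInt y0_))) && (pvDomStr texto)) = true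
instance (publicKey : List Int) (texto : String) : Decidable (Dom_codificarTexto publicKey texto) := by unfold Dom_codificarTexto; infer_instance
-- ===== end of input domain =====

-- B memoizes each byte's encoding in a dict and appends lookups, instead of A's per-byte
-- binary-string walk that mutates the last slot of the result list (objective: faster by a constant factor).
-- On the ASCII domain texto.encode("utf8") is the list of character codes; both ports use that.

-- ===== PORT A =====
-- format(byte, '#010b')[2:] : the 8 binary digits of byte (< 256), MSB first
def pvCodeBits (b : Nat) : List Char :=
  (List.range 8).map (fun i => if (b >>> (7 - i)) % 2 = 1 then '1' else '0')

-- one iteration of A's while loop; publicKey[posicao] is getD (in range under Pre_)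
def pvInnerStep (publicKey : List Int) (codigo : List Char) (acc : List Int) (pos : Nat) : List Int :=
  let acc1 := if pos = 0 then acc ++ [0] else acc
  if codigo.getD pos '0' = '1' then
    acc1.set (acc1.length - 1) (acc1.getD (acc1.length - 1) 0 + publicKey.getD pos 0)
  else acc1

def codificarTexto (publicKey : List Int) (texto : String) : List Int :=
  texto.toList.foldl
    (fun acc c => (List.range 8).foldl (pvInnerStep publicKey (pvCodeBits c.toNat)) acc) []

-- ===== PORT B =====
-- encoding of one byte: sum publicKey[i] over set bits (MSB = index 0)
def pvEncodeByte (publicKey : List Int) (b : Nat) : Int :=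
  (List.range 8).foldl
    (fun v i => if (b >>> (7 - i)) % 2 = 1 then v + publicKey.getD i 0 else v) 0

def pvStepB (publicKey : List Int) (st : List Int × PySem.Dict Nat Int) (c : Char) :
    List Int × PySem.Dict Nat Int :=
  match st.2.get? c.toNat with
  | some v => (st.1 ++ [v], st.2)
  | none =>
      let v := pvEncodeByte publicKey c.toNat
      (st.1 ++ [v], st.2.insert c.toNat v)

def codificarTexto_alt (publicKey : List Int) (texto : String) : List Int :=
  (texto.toList.foldl (pvStepB publicKey) ([], PySem.Dict.empty)).1

-- ===== PRECONDITION & SPEC =====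
-- Pre_ excludes exactly the inputs on which Python A (and B) raise IndexError:
-- some byte of texto has a set bit at a position ≥ len(publicKey).
def Pre_codificarTexto (publicKey : List Int) (texto : String) : Prop :=
  texto.toList.all (fun c => (List.range 8).all (fun i =>
    decide ((c.toNat >>> (7 - i)) % 2 = 1 → i < publicKey.length))) = true
instance (publicKey : List Int) (texto : String) : Decidable (Pre_codificarTexto publicKey texto) := by
  unfold Pre_codificarTexto; infer_instance

def pvWitness_codificarTexto : List Int × String := (([1, 2, 4, 8, 16, 32, 64, 128] : List Int), "ab")

def Spec_codificarTexto (publicKey : List Int) (texto : String) (out : List Int) : Prop := out = codificarTexto_alt publicKey texto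
instance (publicKey : List Int) (texto : String) (out : List Int) : Decidable (Spec_codificarTexto publicKey texto out) := by unfold Spec_codificarTexto; infer_instance

-- ===== CLAIM (what is proved, stated in full; the proofs are below) =====
def Claim_equal_codificarTexto : Prop := ∀ (publicKey : List Int) (texto : String), Dom_codificarTexto publicKey texto → Pre_codificarTexto publicKey texto → Spec_codificarTexto publicKey texto (codificarTexto publicKey texto)

-- ===== LEMMAS AND PROOFS =====

lemma pvStep_zero (pk : List Int) (cod : List Char) (acc : List Int) :
    pvInnerStep pk cod acc 0 =
      acc ++ [if cod.getD 0 '0' = '1' then 0 + pk.getD 0 0 else 0] := by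
  simp only [pvInnerStep]
  split_ifs with h <;>
    simp [List.getD_eq_getElem?_getD]

lemma pvStep_ne_zero (pk : List Int) (cod : List Char) (l : List Int) (v : Int)
    (pos : Nat) (h : pos ≠ 0) :
    pvInnerStep pk cod (l ++ [v]) pos =
      l ++ [if cod.getD pos '0' = '1' then v + pk.getD pos 0 else v] := by
  simp only [pvInnerStep, if_neg h]
  split_ifs with h2 <;>
    simp [List.getD_eq_getElem?_getD]

-- A's inner while loop appends exactly the encoded value of the byte
lemma pvInner_eq (pk : List Int) (b : Nat) (acc : List Int) :
    (List.range 8).foldl (pvInnerStep pk (pvCodeBits b)) acc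
      = acc ++ [pvEncodeByte pk b] := by
  have hr : List.range 8 = [0, 1, 2, 3, 4, 5, 6, 7] := rfl
  rw [hr]
  simp only [List.foldl]
  rw [pvStep_zero, pvStep_ne_zero _ _ _ _ 1 (by decide), pvStep_ne_zero _ _ _ _ 2 (by decide),
      pvStep_ne_zero _ _ _ _ 3 (by decide), pvStep_ne_zero _ _ _ _ 4 (by decide),
      pvStep_ne_zero _ _ _ _ 5 (by decide), pvStep_ne_zero _ _ _ _ 6 (by decide),
      pvStep_ne_zero _ _ _ _ 7 (by decide)]
  simp [pvCodeBits, pvEncodeByte, hr]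

-- the memo dict only ever stores correct encodings, so the two folds agree
lemma pvFold_eq (pk : List Int) : ∀ (cs : List Char) (acc : List Int) (d : PySem.Dict Nat Int),
    (∀ b v, d.get? b = some v → v = pvEncodeByte pk b) →
    cs.foldl (fun a c => (List.range 8).foldl (pvInnerStep pk (pvCodeBits c.toNat)) a) acc
      = (cs.foldl (pvStepB pk) (acc, d)).1 := by
  intro cs
  induction cs with
  | nil => intro acc d _; rfl
  | cons c cs ih =>
      intro acc d hd
      simp only [List.foldl]
      rw [pvInner_eq]
      cases hget : d.get? c.toNat with
      | some v =>
          have hv := hd _ _ hget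
          simp only [pvStepB, hget, hv]
          exact ih _ _ hd
      | none =>
          simp only [pvStepB, hget]
          apply ih
          intro b v hbv
          rw [PySem.Dict.get?_insert] at hbv
          by_cases hb : b = c.toNat
          · subst hb; rw [if_pos rfl] at hbv; exact (Option.some.inj hbv).symm
          · rw [if_neg hb] at hbv; exact hd _ _ hbv

-- ===== VERDICT (by name: the statement is the Claim_ definition above) =====
theorem codificarTexto_spec : Claim_equal_codificarTexto := by
  intro pk t _ _
  unfold Spec_codificarTexto codificarTexto codificarTexto_alt
  exact pvFold_eq pk t.toList [] PySem.Dict.empty (by intro b v h; simp [PySem.Dict.get?_empty] at h)
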